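-- pv_equiv track=rewrite | github.com/hudsonhs/aoc2025 | dec-3.py | getMaxJolts2
-- ===== SOURCE A (Python) =====
-- def getMaxJolts2(line:str) -> int:
--     resList = ['0'] * 12
--     for i, digit in enumerate(line):
--         # when there are 12 left, we want this to be 0, then increase until it's at 12.
--         startComparison = max(i + 12 - (len(line)), 0)
--         for j in range(startComparison, 12):
--             if int(digit) > int(resList[j]):
--                 resList[j] = digit
--                 #reset the rest of the resList(if applicable) to 0s
--                 resList[j+1:12] = ['0'] * (12 - (j + 1))
--                 break
--     return int(''.join(resList))
-- ===== SOURCE B (Python) =====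
-- def getMaxJolts2(line: str) -> int:
--     # Canonical monotonic-stack "maximum 12-digit subsequence": one amortized pass
--     # with a drop budget instead of A's per-character scan of a 12-slot array.
--     to_remove = max(len(line) - 12, 0)
--     stack = []
--     for d in line:
--         v = int(d)
--         while stack and to_remove and int(stack[-1]) < v:
--             stack.pop()
--             to_remove -= 1
--         stack.append(d)
--     return int(''.join(stack[:12]).rjust(12, '0'))
-- ===== Notes on version B (the rewrite author's own statement) =====
-- stated objective: alternative
-- what changed: Replaces A's per-character scan of a fixed 12-slot candidate array (overwrite-and-zero-rest) by the canonical monotonic-stack maximum-k-subsequence algorithm with a drop budget: pop smaller stack tops while budget remains, push, then left-pad the first 12 kept digits with zeros.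
import Mathlib
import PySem

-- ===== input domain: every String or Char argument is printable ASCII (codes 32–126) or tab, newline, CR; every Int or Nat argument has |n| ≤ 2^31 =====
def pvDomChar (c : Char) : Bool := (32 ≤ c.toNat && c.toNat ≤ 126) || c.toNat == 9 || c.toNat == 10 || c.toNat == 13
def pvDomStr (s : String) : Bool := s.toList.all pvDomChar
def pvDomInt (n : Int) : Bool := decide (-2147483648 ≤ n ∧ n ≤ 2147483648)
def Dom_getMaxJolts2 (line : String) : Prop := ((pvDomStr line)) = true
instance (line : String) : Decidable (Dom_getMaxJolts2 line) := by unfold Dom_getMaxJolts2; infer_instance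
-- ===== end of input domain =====

-- B replaces A's per-character scan of a fixed 12-slot candidate array by the canonical
-- monotonic-stack maximum-12-digit-subsequence algorithm with a drop budget (alternative algorithm).


-- ===== PORT A =====
-- int(c) for a one-character string c; Pre_ admits only digit characters, where this is exact
-- (on non-digits Python raises ValueError, ofChars? = none).
def pyIntChar (c : Char) : Int := (PySem.Int.ofChars? [c]).getD 0

-- the inner `for j in range(start, 12)` loop of A, run on resList[start:]:
-- the first slot with int(digit) > int(resList[j]) is overwritten and the slots after it reset to '0' (break).
def innerA (d : Char) : List Char → List Char
  | [] => []
  | x :: xs => if pyIntChar d > pyIntChar x then d :: List.replicate xs.length '0' else x :: innerA d xs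

-- one iteration of A's outer loop: p = (i, digit); startComparison = max(i + 12 - len(line), 0) (≥ 0, so toNat is exact)
def stepA (n : Int) (r : List Char) (p : Int × Char) : List Char :=
  let start := (max (p.1 + 12 - n) 0).toNat
  r.take start ++ innerA p.2 (r.drop start)

def getMaxJolts2 (line : String) : Int :=
  let cs := line.toList
  let res := (PySem.List.enumerate cs).foldl (stepA (PySem.List.len cs)) (List.replicate 12 '0')
  -- int(''.join(resList)): under Pre_ resList holds 12 digit characters, so ofChars? succeeds
  (PySem.Int.ofChars? res).getD 0

-- ===== PORT B =====
-- `while stack and to_remove and int(stack[-1]) < v: stack.pop(); to_remove -= 1`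
-- (the stack is held top-first, so stack[-1] is the head)
def popB : List Char → Int → Int → List Char × Int
  | [], b, _ => ([], b)
  | x :: xs, b, v => if b ≠ 0 ∧ pyIntChar x < v then popB xs (b - 1) v else (x :: xs, b)

-- one iteration of B's loop: pop while smaller and budget remains, then push d
def stepB (s : List Char × Int) (d : Char) : List Char × Int :=
  let p := popB s.1 s.2 (pyIntChar d)
  (d :: p.1, p.2)

def getMaxJolts2_alt (line : String) : Int :=
  let cs := line.toList
  let fin := cs.foldl stepB ([], max (PySem.List.len cs - 12) 0)
  let kept := fin.1.reverse.take 12          -- stack[:12] (stack held top-first)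
  -- int(''.join(kept).rjust(12, '0')): left-pad with '0' to width 12
  (PySem.Int.ofChars? (List.replicate (12 - kept.length) '0' ++ kept)).getD 0

-- ===== PRECONDITION & SPEC =====
-- Pre_ = exactly the inputs where A returns: int(digit) raises ValueError on any non-digit character.
def Pre_getMaxJolts2 (line : String) : Prop := line.toList.all Char.isDigit = true
instance (line : String) : Decidable (Pre_getMaxJolts2 line) := by unfold Pre_getMaxJolts2; infer_instance
def pvWitness_getMaxJolts2 : String := "90327"

def Spec_getMaxJolts2 (line : String) (out : Int) : Prop := out = getMaxJolts2_alt line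
instance (line : String) (out : Int) : Decidable (Spec_getMaxJolts2 line out) := by unfold Spec_getMaxJolts2; infer_instance

-- ===== CLAIM (what is proved, stated in full; the proofs are below) =====
def Claim_equal_getMaxJolts2 : Prop := ∀ (line : String), Dom_getMaxJolts2 line → Pre_getMaxJolts2 line → Spec_getMaxJolts2 line (getMaxJolts2 line)

-- ===== LEMMAS AND PROOFS =====

-- A's resList, as a function of B's stack (top-first): 12∸n leading zeros, the stack
-- oldest-first, zero-filled on the right, truncated to 12 slots.
def encode (n : Nat) (stR : List Char) : List Char :=
  (List.replicate (12 - n) '0' ++ stR.reverse ++ List.replicate 12 '0').take 12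

-- A's outer loop rewritten as structural recursion on the remaining input; at each step
-- startComparison = 12 ∸ (number of characters still to process).
def runA : List Char → List Char → List Char
  | [], r => r
  | d :: t, r => runA t (r.take (12 - (t.length + 1)) ++ innerA d (r.drop (12 - (t.length + 1))))

lemma digit_mem (d : Char) (h : d.isDigit = true) :
    d ∈ ['0', '1', '2', '3', '4', '5', '6', '7', '8', '9'] := by
  simp only [Char.isDigit, Bool.and_eq_true, decide_eq_true_eq] at h
  have h1 : 48 ≤ d.toNat := h.1
  have h2 : d.toNat ≤ 57 := h.2
  have hd : d = Char.ofNat d.toNat := by simp [Char.ofNat_toNat]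
  interval_cases hm : d.toNat <;> simp_all

lemma digit_nonpos (d : Char) (h : d.isDigit = true) (hv : pyIntChar d ≤ 0) : d = '0' := by
  have hm := digit_mem d h
  fin_cases hm <;> revert hv <;> decide

lemma innerA_no (d : Char) (w : List Char) (h : ∀ x ∈ w, ¬ pyIntChar x < pyIntChar d) :
    innerA d w = w := by
  induction w with
  | nil => rfl
  | cons x xs ih =>
      simp only [innerA, gt_iff_lt]
      rw [if_neg (h x (List.mem_cons_self ..)), ih (fun y hy => h y (List.mem_cons_of_mem _ hy))]

lemma innerA_hit (d : Char) (u : List Char) (x : Char) (rest : List Char)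
    (hu : ∀ y ∈ u, ¬ pyIntChar y < pyIntChar d) (hx : pyIntChar x < pyIntChar d) :
    innerA d (u ++ x :: rest) = u ++ d :: List.replicate rest.length '0' := by
  induction u with
  | nil => simp [innerA, hx]
  | cons y ys ih =>
      simp only [List.cons_append, innerA, gt_iff_lt]
      rw [if_neg (hu y (List.mem_cons_self ..)), ih (fun z hz => hu z (List.mem_cons_of_mem _ hz))]

lemma dropWhile_not_lt (v : Int) (T : List Char)
    (hm : List.Pairwise (fun a c => pyIntChar a ≤ pyIntChar c) T) :
    ∀ x ∈ T.dropWhile (fun c => decide (pyIntChar c < v)), ¬ pyIntChar x < v := by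
  induction T with
  | nil => simp
  | cons a t ih =>
      rcases List.pairwise_cons.mp hm with ⟨ha, ht⟩
      by_cases h : pyIntChar a < v
      · simpa [List.dropWhile_cons, h] using ih ht
      · simp only [List.dropWhile_cons, decide_eq_true_eq]
        rw [if_neg h]
        intro x hx
        rcases List.mem_cons.mp hx with rfl | hx
        · exact h
        · have := ha x hx; omega

lemma popB_eq (stR : List Char) (b v : Int) (hb : 0 ≤ b) :
    popB stR b v =
      (stR.drop ((stR.take b.toNat).takeWhile (fun c => decide (pyIntChar c < v))).length,
       b - ((stR.take b.toNat).takeWhile (fun c => decide (pyIntChar c < v))).length) := by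
  induction stR generalizing b with
  | nil => simp [popB]
  | cons x xs ih =>
      by_cases hb0 : b = 0
      · subst hb0; simp [popB]
      · have hbt : b.toNat = (b - 1).toNat + 1 := by omega
        by_cases hx : pyIntChar x < v
        · rw [popB, if_pos ⟨hb0, hx⟩, ih (b - 1) (by omega), hbt]
          simp [List.takeWhile_cons, hx]
          omega
        · rw [popB, if_neg (by tauto), hbt]
          simp [List.takeWhile_cons, hx]

lemma val_zero : pyIntChar '0' = 0 := by decide

-- the visible part of one step: A's inner scan over window++zeros equals B's pop-and-push,
-- where U (kept window part) is all ≥ d and V (popped part) is all < d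
lemma innerA_core (d : Char) (U V : List Char) (K : Nat)
    (hd : d.isDigit = true) (hK : K ≤ 12)
    (hU : ∀ x ∈ U, ¬ pyIntChar x < pyIntChar d)
    (hV : ∀ x ∈ V, pyIntChar x < pyIntChar d) :
    innerA d ((U ++ (V ++ List.replicate 12 '0')).take K)
      = (U ++ ([d] ++ List.replicate 12 '0')).take K := by
  by_cases hUK : K ≤ U.length
  · rw [List.take_append_of_le_length hUK, List.take_append_of_le_length hUK]
    exact innerA_no d _ (fun x hx => hU x (List.mem_of_mem_take hx))
  · push_neg at hUK
    have hUt : U.take K = U := List.take_of_length_le (by omega)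
    have hsplit : ∀ (X : List Char), (U ++ X).take K = U ++ X.take (K - U.length) := by
      intro X; rw [List.take_append, hUt]
    rw [hsplit, hsplit]
    have hK1 : 1 ≤ K - U.length := by omega
    have hrhs : ([d] ++ List.replicate 12 '0').take (K - U.length)
        = d :: List.replicate (K - U.length - 1) '0' := by
      rw [List.singleton_append, show K - U.length = (K - U.length - 1) + 1 by omega,
        List.take_succ_cons, List.take_replicate]
      congr 2
      omega
    rw [hrhs]
    cases V with
    | cons x V' =>
        have hx1 : ((x :: V') ++ List.replicate 12 '0').take (K - U.length)
            = x :: (V' ++ List.replicate 12 '0').take (K - U.length - 1) := by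
          rw [List.cons_append, show K - U.length = (K - U.length - 1) + 1 by omega,
            List.take_succ_cons, Nat.add_sub_cancel]
        rw [hx1, innerA_hit d U x _ hU (hV x (List.mem_cons_self ..))]
        simp only [List.length_take, List.length_append, List.length_replicate]
        congr 3
        omega
    | nil =>
        rw [List.nil_append, List.take_replicate,
          show min (K - U.length) 12 = K - U.length by omega]
        by_cases hv : 0 < pyIntChar d
        · rw [show (K - U.length) = (K - U.length - 1) + 1 by omega, List.replicate_succ,
            innerA_hit d U '0' _ hU (by rw [val_zero]; exact hv), List.length_replicate,
            Nat.add_sub_cancel]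
        · rw [innerA_no d _ (by
            intro x hx
            rcases List.mem_append.mp hx with hx | hx
            · exact hU x hx
            · rw [List.eq_of_mem_replicate hx, val_zero]; omega)]
          rw [digit_nonpos d hd (by omega),
            show (K - U.length) = (K - U.length - 1) + 1 by omega, List.replicate_succ,
            Nat.add_sub_cancel]

lemma step_eq (n : Nat) (stR : List Char) (b : Int) (d : Char) (start : Nat)
    (hd : d.isDigit = true) (h0 : 0 ≤ b)
    (hstart : start = (12 - n) + (stR.length - b.toNat)) (hle : start ≤ 12)
    (hmono : List.Pairwise (fun a c => pyIntChar a ≤ pyIntChar c) (stR.take b.toNat)) :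
    (encode n stR).take start ++ innerA d ((encode n stR).drop start)
      = encode n (d :: (popB stR b (pyIntChar d)).1) := by
  rw [popB_eq stR b (pyIntChar d) h0]
  set v := pyIntChar d with hv
  set T := stR.take b.toNat with hT
  set m := (T.takeWhile fun c => decide (pyIntChar c < v)).length with hm
  set R := stR.drop b.toNat with hR
  set U := (T.dropWhile fun c => decide (pyIntChar c < v)).reverse with hUdef
  set V := (T.takeWhile fun c => decide (pyIntChar c < v)).reverse with hVdef
  have hTR : stR = T ++ R := (List.take_append_drop _ _).symm
  have hTrev : T.reverse = U ++ V := by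
    rw [hUdef, hVdef, ← List.reverse_append, List.takeWhile_append_dropWhile]
  have hU : ∀ x ∈ U, ¬ pyIntChar x < v := fun x hx =>
    dropWhile_not_lt v T hmono x (List.mem_reverse.mp hx)
  have hV : ∀ x ∈ V, pyIntChar x < v := fun x hx => by
    have := List.mem_takeWhile_imp (List.mem_reverse.mp hx)
    simpa using this
  have hTdrop : T.drop m = T.dropWhile fun c => decide (pyIntChar c < v) := by
    conv_lhs => rw [← List.takeWhile_append_dropWhile (p := fun c => decide (pyIntChar c < v)) (l := T)]
    rw [hm, List.drop_left]
  have hmT : m ≤ T.length := by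
    rw [hm]
    exact (List.takeWhile_sublist _).length_le
  have hdropm : (stR.drop m).reverse = R.reverse ++ U := by
    conv_lhs => rw [hTR, List.drop_append_of_le_length hmT]
    rw [List.reverse_append, hTdrop, hUdef]
  have hTlen : T.length = min b.toNat stR.length := by rw [hT, List.length_take]
  have hRlen : R.length = stR.length - b.toNat := by rw [hR, List.length_drop]
  have hrev : stR.reverse = R.reverse ++ (U ++ V) := by
    conv_lhs => rw [hTR]
    rw [List.reverse_append, hTrev]
  have hAlen : (List.replicate (12 - n) '0' ++ R.reverse).length = start := by
    simp only [List.length_append, List.length_replicate, List.length_reverse, hRlen, hstart]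
  -- left-hand side pieces
  have hencl : encode n stR
      = ((List.replicate (12 - n) '0' ++ R.reverse) ++ (U ++ (V ++ List.replicate 12 '0'))).take 12 := by
    rw [encode, hrev]
    simp [List.append_assoc]
  have htake : (encode n stR).take start = List.replicate (12 - n) '0' ++ R.reverse := by
    rw [hencl, List.take_take, show min start 12 = start by omega, ← hAlen, List.take_left]
  have hdrop : (encode n stR).drop start
      = (U ++ (V ++ List.replicate 12 '0')).take (12 - start) := by
    rw [hencl, List.drop_take, ← hAlen, List.drop_left]
  -- right-hand side
  have hrhs : encode n (d :: stR.drop m)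
      = (List.replicate (12 - n) '0' ++ R.reverse)
          ++ (U ++ ([d] ++ List.replicate 12 '0')).take (12 - start) := by
    rw [encode, show (d :: stR.drop m).reverse = (stR.drop m).reverse ++ [d] from by simp, hdropm]
    rw [show List.replicate (12 - n) '0' ++ (R.reverse ++ U ++ [d]) ++ List.replicate 12 '0'
          = (List.replicate (12 - n) '0' ++ R.reverse) ++ (U ++ ([d] ++ List.replicate 12 '0')) from by
        simp [List.append_assoc]]
    rw [List.take_append, List.take_of_length_le (by omega), hAlen]
  rw [htake, hdrop, hrhs, innerA_core d U V (12 - start) hd (by omega) hU hV]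

lemma main_inv (n : Nat) (l : List Char) : ∀ (stR : List Char) (b : Int),
    (∀ c ∈ l, c.isDigit = true) → 0 ≤ b → b ≤ max ((n : Int) - 12) 0 →
    ((stR.length : Int) + max ((n : Int) - 12) 0 + l.length = (n : Int) + b) →
    List.Pairwise (fun a c => pyIntChar a ≤ pyIntChar c) (stR.take b.toNat) →
    runA l (encode n stR) = encode n (l.foldl stepB (stR, b)).1
      ∧ 0 ≤ (l.foldl stepB (stR, b)).2
      ∧ (l.foldl stepB (stR, b)).2 ≤ max ((n : Int) - 12) 0
      ∧ (((l.foldl stepB (stR, b)).1.length : Int) + max ((n : Int) - 12) 0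
          = (n : Int) + (l.foldl stepB (stR, b)).2) := by
  induction l with
  | nil =>
      intro stR b _ h0 hb hlen _
      refine ⟨rfl, h0, hb, ?_⟩
      simpa using hlen
  | cons d t ih =>
      intro stR b hdig h0 hb hlen hmono
      have hd : d.isDigit = true := hdig d (List.mem_cons_self ..)
      set v := pyIntChar d with hv
      set m := ((stR.take b.toNat).takeWhile fun c => decide (pyIntChar c < v)).length with hm
      have hmT : m ≤ (stR.take b.toNat).length := by
        rw [hm]; exact (List.takeWhile_sublist _).length_le
      have hmlen : m ≤ min b.toNat stR.length := by
        rw [← List.length_take]; exact hmT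
      have hlc : ((d :: t).length : Int) = (t.length : Int) + 1 := by simp
      have hstart : 12 - (t.length + 1) = (12 - n) + (stR.length - b.toNat) := by
        rw [hlc] at hlen; omega
      have hle : (12 - n) + (stR.length - b.toNat) ≤ 12 := by omega
      have hfold : (d :: t).foldl stepB (stR, b) = t.foldl stepB (d :: stR.drop m, b - m) := by
        rw [List.foldl_cons]
        congr 1
        rw [stepB, popB_eq stR b v h0, ← hm]
      have hstep := step_eq n stR b d (12 - (t.length + 1)) hd h0 hstart (by omega) hmono
      rw [popB_eq stR b v h0] at hstep
      have hmono' : List.Pairwise (fun a c => pyIntChar a ≤ pyIntChar c)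
          ((d :: stR.drop m).take (b - m).toNat) := by
        have hbmN : (b - (m : Int)).toNat = b.toNat - m := by omega
        rw [hbmN]
        rcases Nat.eq_zero_or_pos (b.toNat - m) with hz | hz
        · rw [hz, List.take_zero]; exact List.Pairwise.nil
        · rw [show b.toNat - m = (b.toNat - m - 1) + 1 by omega, List.take_succ_cons]
          have hsub : ((stR.drop m).take (b.toNat - m - 1)).Sublist
              ((stR.take b.toNat).drop m) := by
            rw [List.drop_take,
              show (stR.drop m).take (b.toNat - m - 1)
                  = ((stR.drop m).take (b.toNat - m)).take (b.toNat - m - 1) by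
                rw [List.take_take]; congr 1; omega]
            exact List.take_sublist ..
          refine List.pairwise_cons.mpr ⟨?_, ?_⟩
          · intro x hx
            have hxd : x ∈ (stR.take b.toNat).dropWhile fun c => decide (pyIntChar c < v) := by
              have hxm : x ∈ (stR.take b.toNat).drop m := hsub.mem hx
              rw [← List.takeWhile_append_dropWhile
                    (p := fun c => decide (pyIntChar c < v)) (l := stR.take b.toNat)]
                at hxm
              rw [show m = ((stR.take b.toNat).takeWhile
                    fun c => decide (pyIntChar c < v)).length from hm] at hxm
              rwa [List.drop_left] at hxm
            have := dropWhile_not_lt v (stR.take b.toNat) hmono x hxd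
            omega
          · exact hmono.sublist (hsub.trans (List.drop_sublist ..))
      have ihres := ih (d :: stR.drop m) (b - m)
        (fun c hc => hdig c (List.mem_cons_of_mem _ hc))
        (by omega) (by omega)
        (by
          have hdl : (d :: stR.drop m).length = stR.length - m + 1 := by
            simp [List.length_drop]
          rw [hlc] at hlen
          rw [hdl]
          omega)
        hmono'
      rw [hfold]
      refine ⟨?_, ihres.2.1, ihres.2.2.1, ihres.2.2.2⟩
      rw [runA, hstep]
      exact ihres.1

lemma foldA_bridge (n : Nat) (l : List Char) : ∀ (s : Int) (r : List Char), 0 ≤ s →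
    s + l.length = (n : Int) →
    (PySem.List.enumerate l s).foldl (stepA (n : Int)) r = runA l r := by
  induction l with
  | nil => intro s r _ _; simp [PySem.List.enumerate_nil, runA]
  | cons d t ih =>
      intro s r hs hn
      rw [PySem.List.enumerate_cons, List.foldl_cons, runA]
      have hstart : (max (s + 12 - (n : Int)) 0).toNat = 12 - (t.length + 1) := by
        simp only [List.length_cons] at hn; omega
      rw [show stepA (n : Int) r (s, d)
            = r.take (12 - (t.length + 1)) ++ innerA d (r.drop (12 - (t.length + 1))) by
          simp [stepA, hstart]]
      exact ih (s + 1) _ (by omega) (by simp at hn ⊢; omega)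

lemma encode_nil (n : Nat) : encode n [] = List.replicate 12 '0' := by
  unfold encode
  rw [List.reverse_nil, List.append_nil, List.replicate_append_replicate, List.take_replicate]
  have : min 12 (12 - n + 12) = 12 := by omega
  rw [this]

lemma encode_final (n : Nat) (stR : List Char) (b : Int) (h0 : 0 ≤ b)
    (hb : b ≤ max ((n : Int) - 12) 0)
    (hlen : (stR.length : Int) + max ((n : Int) - 12) 0 = (n : Int) + b) :
    encode n stR
      = List.replicate (12 - (stR.reverse.take 12).length) '0' ++ stR.reverse.take 12 := by
  by_cases hn : 12 ≤ n
  · have hst : 12 ≤ stR.length := by omega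
    have h12n : 12 - n = 0 := by omega
    have hkl : (stR.reverse.take 12).length = 12 := by
      rw [List.length_take, List.length_reverse]; omega
    rw [encode, h12n, List.replicate_zero, List.nil_append, hkl, Nat.sub_self,
      List.replicate_zero, List.nil_append]
    exact List.take_append_of_le_length (by rw [List.length_reverse]; omega)
  · have hb0 : b = 0 := by omega
    have hst : stR.length = n := by omega
    have hkept : stR.reverse.take 12 = stR.reverse :=
      List.take_of_length_le (by rw [List.length_reverse]; omega)
    rw [encode, hkept, List.length_reverse, hst,
      List.take_append_of_le_length (by simp [hst]; omega),
      List.take_of_length_le (by simp [hst]; omega)]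

-- ===== VERDICT (by name: the statement is the Claim_ definition above) =====
theorem getMaxJolts2_spec : Claim_equal_getMaxJolts2 := by
  intro line _hdom hpre
  unfold Pre_getMaxJolts2 at hpre
  unfold Spec_getMaxJolts2 getMaxJolts2 getMaxJolts2_alt
  simp only []
  set cs := line.toList with hcs
  set n := cs.length with hn
  have hdig : ∀ c ∈ cs, c.isDigit = true := by
    intro c hc
    exact List.all_eq_true.mp hpre c hc
  have hb0 : (0 : Int) ≤ max ((n : Int) - 12) 0 := le_max_right _ _
  obtain ⟨hrun, hf0, hfb, hflen⟩ :=
    main_inv n cs [] (max ((n : Int) - 12) 0) hdig hb0 (le_refl _)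
      (by rw [hn]; simp; omega) (by simp)
  have hlen_cs : PySem.List.len cs = (n : Int) := by simp [PySem.List.len_eq, hn]
  have hA : (PySem.List.enumerate cs).foldl (stepA ((n : Nat) : Int)) (List.replicate 12 '0')
      = encode n ((cs.foldl stepB ([], max ((n : Int) - 12) 0)).1) := by
    rw [foldA_bridge n cs 0 (List.replicate 12 '0') (le_refl _) (by simp [hn]),
      ← encode_nil n]
    exact hrun
  rw [hlen_cs, hA, encode_final n _ _ hf0 hfb hflen]
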